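-- pv_equiv track=rewrite | github.com/wzdlc1996/pythonPractice | pyLisp/lispker.py | separateByBracket
-- ===== SOURCE A (Python) =====
-- def bracketSubIntegrate(sub) -> str:
--     x = ""
--     for i, item in enumerate(sub):
--         if item == "(":
--             x += "("
--         elif item == ")":
--             x = x[:-1] + ")"
--             if i != len(sub) - 1:
--                 x += " "
--         else:
--             x += item + " "
--     return x
--
-- def separateByBracket(prog) -> list:
--     """
--     Separate the most simple lisp program by brackets
--     :param prog: one-line program without outer like "Plus 1 (Minus 10)"
--     :return: the list of items, like ["Plus", "1", "(Minus 10)"]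
--     """
--     if "(" not in prog and ")" not in prog:
--         return prog.split()
--     else:
--         splitted = prog.replace("(", " ( ").replace(")", " ) ").split()
--         res = []
--         meetBracket = False
--         tembrck = 0
--         for x in splitted:
--             if x == "(":
--                 tembrck += 1
--                 if not meetBracket:
--                     meetBracket = True
--                     res.append(["("])
--                     continue
--             elif x == ")":
--                 tembrck -= 1
--                 if meetBracket and tembrck == 0:
--                     meetBracket = False
--                     res[-1].append(")")
--                     res[-1] = bracketSubIntegrate(res[-1])
--                     continue
--             if not meetBracket:
--                 res.append(x)
--             else:
--                 res[-1].append(x)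
--         return res
-- ===== SOURCE B (Python) =====
-- def separateByBracket(prog) -> list:
--     """Single left-to-right character scan with a global bracket counter:
--     top-level words are flushed on whitespace or bracket boundaries, and a
--     bracket group is normalized on the fly (no intermediate token list,
--     no second integration pass)."""
--     if "(" not in prog and ")" not in prog:
--         return prog.split()
--     res = []
--     c = 0          # running bracket counter over the whole line
--     ingrp = False  # currently inside a captured bracket group
--     g = ""         # the group's normalized text, built incrementally
--     w = ""         # current word
--     for ch in prog:
--         if ch == "(":
--             c += 1
--             if ingrp:
--                 if w:
--                     g += w + " "
--                     w = ""
--                 g += "("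
--             else:
--                 if w:
--                     res.append(w)
--                     w = ""
--                 ingrp = True
--                 g = "("
--         elif ch == ")":
--             c -= 1
--             if ingrp:
--                 if w:
--                     g += w + " "
--                     w = ""
--                 if c == 0:
--                     res.append(g[:-1] + ")")
--                     ingrp = False
--                     g = ""
--                 else:
--                     g = g[:-1] + ") "
--             else:
--                 if w:
--                     res.append(w)
--                     w = ""
--                 res.append(")")
--         elif ch.isspace():
--             if w:
--                 if ingrp:
--                     g += w + " "
--                 else:
--                     res.append(w)
--                 w = ""
--         else:
--             w += ch
--     if ingrp:
--         if w:
--             g += w + " "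
--         res.append(g)
--     elif w:
--         res.append(w)
--     return res
-- ===== Notes on version B (the rewrite author's own statement) =====
-- stated objective: alternative
-- what changed: Replaced the replace/split preprocessing + token state machine with nested lists + second bracketSubIntegrate pass by a single left-to-right character scan that splits words at whitespace/bracket boundaries and builds each bracket group's normalized string incrementally.
-- outside the precondition, e.g. on separateByBracket('('): A returns [['(']], B returns ['(']; on separateByBracket('(('): A returns [['(', '(']], B returns ['((']; on separateByBracket(') ( a ) ( b )'): A returns [')', ['(', 'a', ')', '(', 'b', ')']], B returns [')', '(a) (b) ']
import Mathlib
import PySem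

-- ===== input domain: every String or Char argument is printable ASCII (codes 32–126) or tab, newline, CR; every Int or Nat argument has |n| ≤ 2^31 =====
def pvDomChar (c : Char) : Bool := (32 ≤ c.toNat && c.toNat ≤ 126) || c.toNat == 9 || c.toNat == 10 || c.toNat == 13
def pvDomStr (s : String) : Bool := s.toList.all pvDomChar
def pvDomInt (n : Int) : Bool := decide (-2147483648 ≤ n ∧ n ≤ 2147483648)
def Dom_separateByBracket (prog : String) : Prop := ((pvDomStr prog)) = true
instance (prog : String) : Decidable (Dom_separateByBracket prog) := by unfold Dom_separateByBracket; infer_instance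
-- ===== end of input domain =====

-- B replaces A's replace/split preprocessing + token state machine (nested lists,
-- second bracketSubIntegrate pass) by one character scan building normalized group
-- strings incrementally; equivalence is proved on inputs where every '(' group closes.

-- ===== PORT A =====

/-- An element of A's `res`: either a plain string token or a still-open
bracket-group token list (Python keeps a `list` there); group token lists
are stored newest-first. -/
inductive AItem where
  | s : List Char → AItem
  | l : List (List Char) → AItem

/-- `bracketSubIntegrate`'s loop: index `i` of `n` tokens, accumulator `x`. -/
def bsiGo (sub : List (List Char)) (i n : Nat) (x : List Char) : List Char :=
  match sub with
  | [] => x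
  | item :: rest =>
      let x' := if item = ['('] then x ++ ['(']
        else if item = [')'] then (x.dropLast ++ [')']) ++ (if i ≠ n - 1 then [' '] else [])
        else x ++ item ++ [' ']
      bsiGo rest (i+1) n x'

def bracketSubIntegrateL (sub : List (List Char)) : List Char := bsiGo sub 0 sub.length []

/-- `res[-1].append(x)` of A's loop (`res` stored reversed, group tokens reversed);
the non-`.l` arm is unreachable while `meetBracket` holds. -/
def aAppendLast (res : List AItem) (x : List Char) : List AItem :=
  match res with
  | AItem.l gs :: rest => AItem.l (x :: gs) :: rest
  | r => r

/-- One iteration of A's token loop; state = (res reversed, meetBracket, tembrck). -/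
def aStep (st : List AItem × Bool × Int) (x : List Char) : List AItem × Bool × Int :=
  let (res, mb, t) := st
  if x = ['('] then
    let t' := t + 1
    if ¬ mb then (AItem.l [['(']] :: res, true, t')
    else (aAppendLast res x, mb, t')
  else if x = [')'] then
    let t' := t - 1
    if mb ∧ t' = 0 then
      (match res with
       | AItem.l gs :: rest =>
           (AItem.s (bracketSubIntegrateL ((x :: gs).reverse)) :: rest, false, t')
       | r => (r, false, t'))
    else if ¬ mb then (AItem.s x :: res, mb, t') else (aAppendLast res x, mb, t')
  else if ¬ mb then (AItem.s x :: res, mb, t) else (aAppendLast res x, mb, t)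

/-- Encoding of A's result elements as strings (a leftover `.l` — Python's nested
list, only reachable outside `Pre_` — is space-joined to fit the return type). -/
def aEncode : AItem → List Char
  | AItem.s wd => wd
  | AItem.l gs => PySem.Chars.join [' '] gs.reverse

def aFinal (st : List AItem × Bool × Int) : List String :=
  (st.1.reverse).map (fun it => String.ofList (aEncode it))

def separateByBracket (prog : String) : List String :=
  let cs := prog.toList
  if ¬ PySem.Chars.isIn ['('] cs ∧ ¬ PySem.Chars.isIn [')'] cs then
    (PySem.Chars.split₀ cs).map String.ofList
  else
    let splitted := PySem.Chars.split₀
      (PySem.Chars.replace (PySem.Chars.replace cs ['('] (' ' :: '(' :: [' '])) [')'] (' ' :: ')' :: [' ']))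
    aFinal (splitted.foldl aStep ([], false, 0))

-- ===== PORT B =====

/-- One iteration of B's character scan;
state = (res reversed, counter c, ingrp, group text g, current word w). -/
def bStep (st : List (List Char) × Int × Bool × List Char × List Char) (ch : Char) :
    List (List Char) × Int × Bool × List Char × List Char :=
  let (res, c, ingrp, g, w) := st
  if ch = '(' then
    let c' := c + 1
    if ingrp then
      let g' := if w ≠ [] then g ++ w ++ [' '] else g
      (res, c', ingrp, g' ++ ['('], [])
    else
      let res' := if w ≠ [] then w :: res else res
      (res', c', true, ['('], [])
  else if ch = ')' then
    let c' := c - 1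
    if ingrp then
      let g' := if w ≠ [] then g ++ w ++ [' '] else g
      if c' = 0 then ((g'.dropLast ++ [')']) :: res, c', false, [], [])
      else (res, c', ingrp, g'.dropLast ++ [')', ' '], [])
    else
      let res' := if w ≠ [] then w :: res else res
      ([')'] :: res', c', ingrp, g, [])
  else if PySem.Chars.isspace ch then
    if w ≠ [] then
      (if ingrp then (res, c, ingrp, g ++ w ++ [' '], [])
       else (w :: res, c, ingrp, g, []))
    else st
  else (res, c, ingrp, g, w ++ [ch])

def bFinal (st : List (List Char) × Int × Bool × List Char × List Char) : List String :=
  let (res, _, ingrp, g, w) := st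
  let res' := if ingrp then (if w ≠ [] then g ++ w ++ [' '] else g) :: res
    else if w ≠ [] then w :: res else res
  res'.reverse.map String.ofList

def separateByBracket_alt (prog : String) : List String :=
  let cs := prog.toList
  if ¬ PySem.Chars.isIn ['('] cs ∧ ¬ PySem.Chars.isIn [')'] cs then
    (PySem.Chars.split₀ cs).map String.ofList
  else
    bFinal (cs.foldl bStep ([], 0, false, [], []))

-- ===== PRECONDITION & SPEC =====

/-- Net bracket count of a character list. -/
def bnet (cs : List Char) : Int := (cs.count '(' : Int) - (cs.count ')' : Int)

-- Pre_ excludes exactly the inputs on which some '(' never balances back to net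
-- count 0 at a later ')': there Python A returns a list still containing a nested
-- token LIST, which is not a value of the declared type list[str].
def Pre_separateByBracket (prog : String) : Prop :=
  ∀ i < prog.toList.length, prog.toList[i]! = '(' →
    ∃ j < prog.toList.length, i < j ∧ prog.toList[j]! = ')' ∧ bnet (prog.toList.take (j+1)) = 0

instance (prog : String) : Decidable (Pre_separateByBracket prog) := by
  unfold Pre_separateByBracket; infer_instance

def pvWitness_separateByBracket : String := "Plus 1 (Minus 10)"

def Spec_separateByBracket (prog : String) (out : List String) : Prop := out = separateByBracket_alt prog
instance (prog : String) (out : List String) : Decidable (Spec_separateByBracket prog out) := by unfold Spec_separateByBracket; infer_instance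

-- ===== CLAIM (what is proved, stated in full; the proofs are below) =====
def Claim_equal_separateByBracket : Prop := ∀ (prog : String), Dom_separateByBracket prog → Pre_separateByBracket prog → Spec_separateByBracket prog (separateByBracket prog)

-- ===== LEMMAS AND PROOFS =====

/-- The character substitution A's two `replace` calls amount to. -/
def padC (ch : Char) : List Char :=
  if ch = '(' then [' ', '(', ' '] else if ch = ')' then [' ', ')', ' '] else [ch]

/-- A word character: neither a bracket nor whitespace. -/
def wordC (ch : Char) : Bool := ¬ (ch = '(' ∨ ch = ')' ∨ PySem.Chars.isspace ch)

def emitW (w : List Char) : List (List Char) := if w = [] then [] else [w]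

/-- Tokens of `split₀ (padded cs)` with a pending word prefix `w`. -/
def tokensOf (w : List Char) : List Char → List (List Char)
  | [] => emitW w
  | ch :: cs =>
      if ch = '(' then emitW w ++ [['(']] ++ tokensOf [] cs
      else if ch = ')' then emitW w ++ [[')']] ++ tokensOf [] cs
      else if PySem.Chars.isspace ch then emitW w ++ tokensOf [] cs
      else tokensOf (w ++ [ch]) cs

/-- One `bracketSubIntegrate` step for a non-final token. -/
def pIntStep (x g : List Char) : List Char :=
  if x = ['('] then g ++ ['('] else if x = [')'] then g.dropLast ++ [')', ' '] else g ++ x ++ [' ']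

def pFold (x : List Char) (l : List (List Char)) : List Char :=
  l.foldl (fun g tok => pIntStep tok g) x

/-- The (counter, inGroup) components of B's scan, on their own. -/
def stStep (s : Int × Bool) (ch : Char) : Int × Bool :=
  if ch = '(' then (s.1 + 1, true)
  else if ch = ')' then (s.1 - 1, if s.2 ∧ s.1 - 1 = 0 then false else s.2)
  else s

/-- No ')' in `cs` brings the running count (starting at `c0`) to 0. -/
def Sq (c0 : Int) (cs : List Char) : Prop :=
  ∀ l1 l2, cs = l1 ++ ')' :: l2 → c0 + bnet l1 - 1 ≠ 0

/-- Some '(' in `cs` is never closed by a later net-0 ')'. -/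
def Uq (c0 : Int) (cs : List Char) : Prop :=
  ∃ l1 l2, cs = l1 ++ '(' :: l2 ∧ Sq (c0 + bnet l1 + 1) l2

/-- Relation between A's and B's loop states (pending word excluded). -/
def RelAB (resA : List AItem) (mb : Bool) (t : Int)
    (resB : List (List Char)) (c : Int) (ingrp : Bool) (g : List Char) : Prop :=
  mb = ingrp ∧ t = c ∧
  (ingrp = true →
    ∃ gs rest, resA = AItem.l gs :: rest ∧ rest = resB.map AItem.s ∧ g = pFold [] gs.reverse) ∧
  (ingrp = false → resA = resB.map AItem.s)

@[simp] lemma aEncode_s (wd : List Char) : aEncode (AItem.s wd) = wd := rfl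

@[simp] lemma isspace_lp : PySem.Chars.isspace '(' = false := by decide
@[simp] lemma isspace_rp : PySem.Chars.isspace ')' = false := by decide
@[simp] lemma isspace_sp : PySem.Chars.isspace ' ' = true := by decide

lemma bnet_nil : bnet [] = 0 := by simp [bnet]

lemma bnet_cons (ch : Char) (cs : List Char) :
    bnet (ch :: cs) = (if ch = '(' then 1 else if ch = ')' then -1 else 0) + bnet cs := by
  simp only [bnet, List.count_cons]
  split_ifs with h1 h2 <;> simp_all <;> ring

lemma bnet_append (a b : List Char) : bnet (a ++ b) = bnet a + bnet b := by
  simp only [bnet, List.count_append]; push_cast; ring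

lemma Sq_of_eq {a b : Int} {l : List Char} (h : Sq a l) (e : a = b) : Sq b l := e ▸ h

lemma replace_go_single (o : Char) (new : List Char) :
    ∀ (cs : List Char) (fuel : Nat) (acc : List Char), cs.length ≤ fuel →
      PySem.Chars.replace.go [o] new fuel cs acc
        = acc.reverse ++ cs.flatMap (fun c => if c = o then new else [c]) := by
  intro cs
  induction cs with
  | nil => intro fuel acc h; cases fuel <;> simp [PySem.Chars.replace.go]
  | cons c cs ih =>
    intro fuel acc h
    cases fuel with
    | zero => simp at h
    | succ f =>
      have hf : cs.length ≤ f := by simpa using h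
      simp only [PySem.Chars.replace.go]
      by_cases hco : c = o
      · subst hco
        have hpre : List.isPrefixOf [c] (c :: cs) = true := by
          simp [List.isPrefixOf]
        rw [if_pos hpre]
        simp only [List.length_cons, List.length_nil, Nat.zero_add, List.drop_succ_cons,
          List.drop_zero]
        rw [ih f _ hf]
        simp [List.flatMap_cons]
      · have hpre : List.isPrefixOf [o] (c :: cs) = false := by
          simp [List.isPrefixOf]
          intro h'; exact absurd h'.symm hco
        rw [if_neg (by simp [hpre])]
        rw [ih f _ hf]
        simp [List.flatMap_cons, hco]

lemma replace_pad (cs : List Char) :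
    PySem.Chars.replace (PySem.Chars.replace cs ['('] (' ' :: '(' :: [' '])) [')'] (' ' :: ')' :: [' '])
      = cs.flatMap padC := by
  simp only [PySem.Chars.replace, List.isEmpty_cons, Bool.false_eq_true, if_false]
  rw [replace_go_single '(' _ cs cs.length [] le_rfl]
  rw [replace_go_single ')' _ _ _ [] le_rfl]
  simp only [List.reverse_nil, List.nil_append]
  induction cs with
  | nil => simp
  | cons c cs ih =>
    rw [List.flatMap_cons, List.flatMap_append, ih, List.flatMap_cons]
    congr 1
    by_cases h1 : c = '('
    · subst h1; decide
    · by_cases h2 : c = ')'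
      · subst h2; decide
      · simp [h1, h2, padC]

lemma go_step_space {c : Char} (h : PySem.Chars.isspace c = true) (rest cur : List Char)
    (acc : List (List Char)) :
    PySem.Chars.split₀.go (c :: rest) cur acc
      = PySem.Chars.split₀.go rest [] (if cur.isEmpty then acc else cur.reverse :: acc) := by
  by_cases hc : cur = []
  · subst hc; simp [PySem.Chars.split₀.go, h]
  · simp [PySem.Chars.split₀.go, h, hc, List.isEmpty_iff]

lemma go_step_word {c : Char} (h : PySem.Chars.isspace c = false) (rest cur : List Char)
    (acc : List (List Char)) :
    PySem.Chars.split₀.go (c :: rest) cur acc = PySem.Chars.split₀.go rest (c :: cur) acc := by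
  simp [PySem.Chars.split₀.go, h]

lemma go_nil (cur : List Char) (acc : List (List Char)) :
    PySem.Chars.split₀.go [] cur acc
      = (if cur.isEmpty then acc else cur.reverse :: acc).reverse := by
  simp [PySem.Chars.split₀.go, apply_ite]

lemma flush_acc (w : List Char) (acc : List (List Char)) :
    (if (w.reverse).isEmpty then acc else w.reverse.reverse :: acc) = (emitW w).reverse ++ acc := by
  by_cases hw0 : w = [] <;> simp [hw0, emitW]

lemma split_go_tokens :
    ∀ (cs : List Char) (w : List Char) (acc : List (List Char)),
      (∀ ch ∈ w, wordC ch = true) →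
      PySem.Chars.split₀.go (cs.flatMap padC) w.reverse acc = acc.reverse ++ tokensOf w cs := by
  intro cs
  induction cs with
  | nil =>
    intro w acc hw
    rw [List.flatMap_nil, go_nil, flush_acc]
    simp [tokensOf]
  | cons ch cs ih =>
    intro w acc hw
    rw [List.flatMap_cons]
    by_cases h1 : ch = '('
    · subst h1
      show PySem.Chars.split₀.go (' ' :: '(' :: ' ' :: cs.flatMap padC) w.reverse acc = _
      rw [go_step_space isspace_sp, flush_acc, go_step_word isspace_lp,
        go_step_space isspace_sp]
      simp only [List.isEmpty_cons, Bool.false_eq_true, if_false, List.reverse_cons,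
        List.reverse_nil, List.nil_append]
      rw [show ([] : List Char) = ([] : List Char).reverse from rfl, ih [] _ (by simp)]
      simp [tokensOf, List.append_assoc]
    · by_cases h2 : ch = ')'
      · subst h2
        show PySem.Chars.split₀.go (' ' :: ')' :: ' ' :: cs.flatMap padC) w.reverse acc = _
        rw [go_step_space isspace_sp, flush_acc, go_step_word isspace_rp,
          go_step_space isspace_sp]
        simp only [List.isEmpty_cons, Bool.false_eq_true, if_false, List.reverse_cons,
          List.reverse_nil, List.nil_append]
        rw [show ([] : List Char) = ([] : List Char).reverse from rfl, ih [] _ (by simp)]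
        simp [tokensOf, h1, List.append_assoc]
      · by_cases h3 : PySem.Chars.isspace ch = true
        · rw [show padC ch = [ch] from by simp [padC, h1, h2], List.singleton_append]
          rw [go_step_space h3, flush_acc]
          rw [show ([] : List Char) = ([] : List Char).reverse from rfl, ih [] _ (by simp)]
          simp [tokensOf, h1, h2, h3, List.append_assoc]
        · rw [show padC ch = [ch] from by simp [padC, h1, h2], List.singleton_append]
          rw [go_step_word (by simpa using h3)]
          rw [show ch :: w.reverse = (w ++ [ch]).reverse from by simp]
          rw [ih (w ++ [ch]) _ ?_]
          · simp only [tokensOf, h1, h2, h3, if_false, Bool.false_eq_true]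
          · intro x hx
            rcases List.mem_append.mp hx with h | h
            · exact hw x h
            · simp only [List.mem_singleton] at h; subst h; simp [wordC, h1, h2, h3]

lemma split_pad (cs : List Char) :
    PySem.Chars.split₀ (cs.flatMap padC) = tokensOf [] cs := by
  have := split_go_tokens cs [] [] (by simp)
  simpa [PySem.Chars.split₀] using this

lemma pFold_append (x : List Char) (l : List (List Char)) (tok : List Char) :
    pFold x (l ++ [tok]) = pIntStep tok (pFold x l) := by
  simp [pFold]

lemma pFold_cons (x : List Char) (item : List Char) (l : List (List Char)) :
    pFold x (item :: l) = pFold (pIntStep item x) l := by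
  simp [pFold]

lemma bsi_close :
    ∀ (l : List (List Char)) (i : Nat) (x : List Char),
      bsiGo (l ++ [[')']]) i (i + l.length + 1) x = (pFold x l).dropLast ++ [')'] := by
  intro l
  induction l with
  | nil => intro i x; simp [bsiGo, pFold]
  | cons item l ih =>
    intro i x
    have harith : i + (item :: l).length + 1 = (i+1) + l.length + 1 := by
      simp only [List.length_cons]; omega
    rw [harith]
    have hne : i ≠ (i+1) + l.length + 1 - 1 := by omega
    simp only [List.cons_append, bsiGo, hne, ne_eq, not_false_eq_true, if_true]
    rw [pFold_cons]
    by_cases h1 : item = ['(']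
    · subst h1
      rw [if_pos rfl, ih (i+1) (x ++ ['('])]
      simp [pIntStep]
    · by_cases h2 : item = [')']
      · subst h2
        rw [if_neg (by decide), if_pos rfl]
        rw [show (x.dropLast ++ [')']) ++ [' '] = x.dropLast ++ [')', ' '] from by simp]
        rw [ih (i+1) _]
        simp [pIntStep]
      · rw [if_neg h1, if_neg h2]
        rw [ih (i+1) _]
        simp [pIntStep, h1, h2]

lemma word_ne_brackets {w : List Char} (hw : ∀ ch ∈ w, wordC ch = true) (hne : w ≠ []) :
    w ≠ ['('] ∧ w ≠ [')'] := by
  constructor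
  · rintro rfl; have h := hw '(' (by simp); simp [wordC] at h
  · rintro rfl; have h := hw ')' (by simp); simp [wordC] at h

lemma flush_lemma (resA : List AItem) (resB : List (List Char)) (c : Int) (ingrp : Bool)
    (g w : List Char)
    (hR : RelAB resA ingrp c resB c ingrp g) (hw : ∀ ch ∈ w, wordC ch = true) :
    ∃ resA', List.foldl aStep (resA, ingrp, c) (emitW w) = (resA', ingrp, c) ∧
      (ingrp = true → RelAB resA' true c resB c true (if w ≠ [] then g ++ w ++ [' '] else g)) ∧
      (ingrp = false → RelAB resA' false c (if w ≠ [] then w :: resB else resB) c false g) := by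
  by_cases hw0 : w = []
  · subst hw0
    refine ⟨resA, by simp [emitW], fun he => ?_, fun he => ?_⟩
    · subst he; simpa using hR
    · subst he; simpa using hR
  · obtain ⟨hnb1, hnb2⟩ := word_ne_brackets hw hw0
    obtain ⟨-, -, hT, hF⟩ := hR
    cases ingrp with
    | false =>
      have hres := hF rfl
      refine ⟨AItem.s w :: resA, by simp [emitW, hw0, aStep, hnb1, hnb2],
        fun he => absurd he (by decide), fun _ => ?_⟩
      rw [if_pos hw0]
      exact ⟨rfl, rfl, fun he => absurd he (by decide), fun _ => by simp [hres]⟩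
    | true =>
      obtain ⟨gs, rest, hA, hrest, hg⟩ := hT rfl
      refine ⟨AItem.l (w :: gs) :: rest,
        by simp [emitW, hw0, aStep, hnb1, hnb2, hA, aAppendLast],
        fun _ => ?_, fun he => absurd he (by decide)⟩
      rw [if_pos hw0]
      refine ⟨rfl, rfl, fun _ => ⟨w :: gs, rest, rfl, hrest, ?_⟩,
        fun he => absurd he (by decide)⟩
      rw [List.reverse_cons, pFold_append, ← hg]
      simp [pIntStep, hnb1, hnb2]

lemma main_lemma :
    ∀ (cs : List Char) (resA : List AItem)
      (resB : List (List Char)) (c : Int) (ingrp : Bool) (g w : List Char),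
      RelAB resA ingrp c resB c ingrp g →
      (∀ ch ∈ w, wordC ch = true) →
      (List.foldl stStep (c, ingrp) cs).2 = false →
      bFinal (List.foldl bStep (resB, c, ingrp, g, w) cs)
        = aFinal (List.foldl aStep (resA, ingrp, c) (tokensOf w cs)) := by
  intro cs
  induction cs with
  | nil =>
    intro resA resB c ingrp g w hR hw hst
    simp only [List.foldl_nil] at hst ⊢
    subst hst
    obtain ⟨resA', hfold, -, hRF⟩ := flush_lemma resA resB c false g w hR hw
    have hres' := (hRF rfl).2.2.2 rfl
    rw [show tokensOf w [] = emitW w from by rw [tokensOf], hfold]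
    by_cases hw0 : w = []
    · subst hw0
      rw [if_neg (by simp)] at hres'
      simp [bFinal, aFinal, hres', List.map_reverse, List.map_map, Function.comp_def]
    · rw [if_pos hw0] at hres'
      simp [bFinal, aFinal, hres', hw0, List.map_reverse, List.map_map, Function.comp_def]
  | cons ch cs ih =>
    intro resA resB c ingrp g w hR hw hst
    rw [List.foldl_cons] at hst ⊢
    obtain ⟨resA1, hfoldA, hRT, hRF⟩ := flush_lemma resA resB c ingrp g w hR hw
    by_cases h1 : ch = '('
    · subst h1
      rw [show stStep (c, ingrp) '(' = (c + 1, true) from by simp [stStep]] at hst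
      rw [show tokensOf w ('(' :: cs) = emitW w ++ [['(']] ++ tokensOf [] cs from by
        rw [tokensOf, if_pos rfl]]
      simp only [List.foldl_append]
      rw [hfoldA]
      cases ingrp with
      | true =>
        obtain ⟨gs1, rest1, hA1, hrest1, hg1⟩ := (hRT rfl).2.2.1 rfl
        rw [show List.foldl aStep (resA1, true, c) [['(']]
              = (AItem.l (['('] :: gs1) :: rest1, true, c + 1) from by
          simp [aStep, hA1, aAppendLast]]
        rw [show bStep (resB, c, true, g, w) '('
              = (resB, c + 1, true, (if w ≠ [] then g ++ w ++ [' '] else g) ++ ['('], []) from by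
          simp [bStep]]
        refine ih _ _ _ _ _ []
          ⟨rfl, rfl, fun _ => ⟨['('] :: gs1, rest1, rfl, hrest1, ?_⟩,
            fun he => absurd he (by decide)⟩ (by simp) hst
        rw [List.reverse_cons, pFold_append, ← hg1]
        simp [pIntStep]
      | false =>
        have hres1 := (hRF rfl).2.2.2 rfl
        rw [show List.foldl aStep (resA1, false, c) [['(']]
              = (AItem.l [['(']] :: resA1, true, c + 1) from by simp [aStep]]
        rw [show bStep (resB, c, false, g, w) '('
              = ((if w ≠ [] then w :: resB else resB), c + 1, true, ['('], []) from by
          simp [bStep]]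
        exact ih _ _ _ _ _ []
          ⟨rfl, rfl, fun _ => ⟨[['(']], resA1, rfl, hres1, by simp [pFold, pIntStep]⟩,
            fun he => absurd he (by decide)⟩ (by simp) hst
    · by_cases h2 : ch = ')'
      · subst h2
        rw [show tokensOf w (')' :: cs) = emitW w ++ [[')']] ++ tokensOf [] cs from by
          rw [tokensOf, if_neg (by decide), if_pos rfl]]
        simp only [List.foldl_append]
        rw [hfoldA]
        cases ingrp with
        | true =>
          obtain ⟨gs1, rest1, hA1, hrest1, hg1⟩ := (hRT rfl).2.2.1 rfl
          by_cases hc0 : c - 1 = 0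
          · rw [show stStep (c, true) ')' = (c - 1, false) from by simp [stStep, hc0]] at hst
            have hint : bracketSubIntegrateL (gs1.reverse ++ [[')']])
                = (pFold [] gs1.reverse).dropLast ++ [')'] := by
              unfold bracketSubIntegrateL
              rw [show (gs1.reverse ++ [[')']]).length = 0 + gs1.reverse.length + 1 from by simp]
              exact bsi_close gs1.reverse 0 []
            rw [show List.foldl aStep (resA1, true, c) [[')']]
                  = (AItem.s ((if w ≠ [] then g ++ w ++ [' '] else g).dropLast ++ [')']) :: rest1,
                      false, c - 1) from by
              simp [aStep, hA1, hint, hc0, ← hg1]]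
            rw [show bStep (resB, c, true, g, w) ')'
                  = (((if w ≠ [] then g ++ w ++ [' '] else g).dropLast ++ [')']) :: resB,
                      c - 1, false, [], []) from by simp [bStep, hc0]]
            exact ih _ _ _ _ _ []
              ⟨rfl, rfl, fun he => absurd he (by decide), fun _ => by
                simp [hrest1]⟩ (by simp) hst
          · rw [show stStep (c, true) ')' = (c - 1, true) from by simp [stStep, hc0]] at hst
            rw [show List.foldl aStep (resA1, true, c) [[')']]
                  = (AItem.l ([')'] :: gs1) :: rest1, true, c - 1) from by
              simp [aStep, hA1, aAppendLast, hc0]]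
            rw [show bStep (resB, c, true, g, w) ')'
                  = (resB, c - 1, true,
                      (if w ≠ [] then g ++ w ++ [' '] else g).dropLast ++ [')', ' '], []) from by
              simp [bStep, hc0]]
            refine ih _ _ _ _ _ []
              ⟨rfl, rfl, fun _ => ⟨[')'] :: gs1, rest1, rfl, hrest1, ?_⟩,
                fun he => absurd he (by decide)⟩ (by simp) hst
            rw [List.reverse_cons, pFold_append, ← hg1]
            simp [pIntStep]
        | false =>
          have hres1 := (hRF rfl).2.2.2 rfl
          rw [show stStep (c, false) ')' = (c - 1, false) from by simp [stStep]] at hst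
          rw [show List.foldl aStep (resA1, false, c) [[')']]
                = (AItem.s [')'] :: resA1, false, c - 1) from by simp [aStep]]
          rw [show bStep (resB, c, false, g, w) ')'
                = ([')'] :: (if w ≠ [] then w :: resB else resB), c - 1, false, g, []) from by
            simp [bStep]]
          exact ih _ _ _ _ _ []
            ⟨rfl, rfl, fun he => absurd he (by decide), fun _ => by
              simp [hres1]⟩ (by simp) hst
      · by_cases h3 : PySem.Chars.isspace ch = true
        · rw [show stStep (c, ingrp) ch = (c, ingrp) from by simp [stStep, h1, h2]] at hst
          rw [show tokensOf w (ch :: cs) = emitW w ++ tokensOf [] cs from by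
            rw [tokensOf, if_neg h1, if_neg h2, if_pos h3]]
          rw [List.foldl_append, hfoldA]
          cases ingrp with
          | true =>
            rw [show bStep (resB, c, true, g, w) ch
                  = (resB, c, true, (if w ≠ [] then g ++ w ++ [' '] else g), []) from by
              by_cases hw0 : w = [] <;> simp [bStep, h1, h2, h3, hw0]]
            exact ih _ _ _ _ _ [] (hRT rfl) (by simp) hst
          | false =>
            rw [show bStep (resB, c, false, g, w) ch
                  = ((if w ≠ [] then w :: resB else resB), c, false, g, []) from by
              by_cases hw0 : w = [] <;> simp [bStep, h1, h2, h3, hw0]]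
            exact ih _ _ _ _ _ [] (hRF rfl) (by simp) hst
        · rw [show stStep (c, ingrp) ch = (c, ingrp) from by simp [stStep, h1, h2]] at hst
          rw [show tokensOf w (ch :: cs) = tokensOf (w ++ [ch]) cs from by
            rw [tokensOf, if_neg h1, if_neg h2, if_neg h3]]
          rw [show bStep (resB, c, ingrp, g, w) ch = (resB, c, ingrp, g, w ++ [ch]) from by
            simp [bStep, h1, h2, h3]]
          refine ih _ _ _ _ _ (w ++ [ch]) hR ?_ hst
          intro x hx
          rcases List.mem_append.mp hx with hxx | hxx
          · exact hw x hxx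
          · simp only [List.mem_singleton] at hxx
            subst hxx
            simp [wordC, h1, h2, h3]

lemma Sq_nil (c0 : Int) : Sq c0 [] := by intro l1 l2 h; simp at h

lemma Uq_nil (c0 : Int) : ¬ Uq c0 [] := by rintro ⟨l1, l2, h, -⟩; simp at h

lemma Sq_cons (c0 : Int) (ch : Char) (cs : List Char) :
    Sq c0 (ch :: cs) ↔ ((ch = ')' → c0 - 1 ≠ 0) ∧
      Sq (c0 + (if ch = '(' then 1 else if ch = ')' then -1 else 0)) cs) := by
  constructor
  · intro h
    constructor
    · intro hch; subst hch
      have h0 := h [] cs rfl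
      rw [bnet_nil] at h0
      omega
    · intro l1 l2 heq
      have h1 := h (ch :: l1) l2 (by simp [heq])
      rw [bnet_cons] at h1
      intro hcontra; apply h1; omega
  · rintro ⟨hh1, hh2⟩ l1 l2 heq
    cases l1 with
    | nil =>
      simp only [List.nil_append, List.cons.injEq] at heq
      obtain ⟨rfl, rfl⟩ := heq
      have := hh1 rfl
      rw [bnet_nil]
      omega
    | cons a l1' =>
      rw [List.cons_append, List.cons.injEq] at heq
      obtain ⟨rfl, heq2⟩ := heq
      have := hh2 l1' l2 heq2
      rw [bnet_cons]
      intro hcontra; apply this; omega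

lemma Uq_cons (c0 : Int) (ch : Char) (cs : List Char) :
    Uq c0 (ch :: cs) ↔ ((ch = '(' ∧ Sq (c0 + 1) cs) ∨
      Uq (c0 + (if ch = '(' then 1 else if ch = ')' then -1 else 0)) cs) := by
  constructor
  · rintro ⟨l1, l2, heq, hS⟩
    cases l1 with
    | nil =>
      simp only [List.nil_append, List.cons.injEq] at heq
      obtain ⟨rfl, rfl⟩ := heq
      exact Or.inl ⟨rfl, Sq_of_eq hS (by rw [bnet_nil]; ring)⟩
    | cons a l1' =>
      rw [List.cons_append, List.cons.injEq] at heq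
      obtain ⟨rfl, heq2⟩ := heq
      exact Or.inr ⟨l1', l2, heq2, Sq_of_eq hS (by rw [bnet_cons]; ring)⟩
  · rintro (⟨rfl, hS⟩ | ⟨l1, l2, heq, hS⟩)
    · exact ⟨[], cs, rfl, Sq_of_eq hS (by rw [bnet_nil]; ring)⟩
    · exact ⟨ch :: l1, l2, by rw [List.cons_append, heq],
        Sq_of_eq hS (by rw [bnet_cons]; ring)⟩

lemma st_char :
    ∀ (cs : List Char) (c0 : Int) (b0 : Bool),
      (List.foldl stStep (c0, b0) cs).2 = true ↔ ((b0 = true ∧ Sq c0 cs) ∨ Uq c0 cs) := by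
  intro cs
  induction cs with
  | nil =>
    intro c0 b0
    simp only [List.foldl_nil]
    constructor
    · intro h; exact Or.inl ⟨h, Sq_nil c0⟩
    · rintro (⟨hb, -⟩ | hU)
      · exact hb
      · exact absurd hU (Uq_nil c0)
  | cons ch cs ih =>
    intro c0 b0
    rw [List.foldl_cons, Sq_cons, Uq_cons]
    by_cases h1 : ch = '('
    · subst h1
      rw [show stStep (c0, b0) '(' = (c0 + 1, true) from by simp [stStep]]
      rw [show (if ('(' : Char) = '(' then (1 : Int) else if ('(' : Char) = ')' then -1 else 0)
            = 1 from by simp]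
      rw [ih]
      constructor
      · rintro (⟨-, hS⟩ | hU)
        · exact Or.inr (Or.inl ⟨rfl, hS⟩)
        · exact Or.inr (Or.inr hU)
      · rintro (⟨hb, -, hS⟩ | ⟨-, hS⟩ | hU)
        · exact Or.inl ⟨rfl, hS⟩
        · exact Or.inl ⟨rfl, hS⟩
        · exact Or.inr hU
    · by_cases h2 : ch = ')'
      · subst h2
        rw [show stStep (c0, b0) ')'
              = (c0 - 1, if b0 = true ∧ c0 - 1 = 0 then false else b0) from by simp [stStep]]
        rw [show (if (')' : Char) = '(' then (1 : Int) else if (')' : Char) = ')' then -1 else 0)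
              = -1 from by simp]
        rw [show c0 + -1 = c0 - 1 from by ring]
        rw [ih]
        constructor
        · rintro (⟨hb', hS⟩ | hU)
          · by_cases hz : c0 - 1 = 0
            · by_cases hb : b0 = true
              · rw [if_pos ⟨hb, hz⟩] at hb'
                exact absurd hb' (by decide)
              · rw [if_neg (by tauto)] at hb'
                exact absurd hb' hb
            · rw [if_neg (by tauto)] at hb'
              exact Or.inl ⟨hb', fun _ => hz, hS⟩
          · exact Or.inr (Or.inr hU)
        · rintro (⟨hb, hz, hS⟩ | ⟨hcontra, -⟩ | hU)
          · exact Or.inl ⟨by rw [if_neg (by have := hz rfl; tauto)]; exact hb, hS⟩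
          · exact absurd hcontra (by decide)
          · exact Or.inr hU
      · rw [show stStep (c0, b0) ch = (c0, b0) from by simp [stStep, h1, h2]]
        rw [show (if ch = '(' then (1 : Int) else if ch = ')' then -1 else 0) = 0 from by
          simp [h1, h2]]
        rw [show c0 + (0 : Int) = c0 from by ring]
        rw [ih]
        constructor
        · rintro (⟨hb, hS⟩ | hU)
          · exact Or.inl ⟨hb, fun hch => absurd hch h2, hS⟩
          · exact Or.inr (Or.inr hU)
        · rintro (⟨hb, -, hS⟩ | ⟨hcontra, -⟩ | hU)
          · exact Or.inl ⟨hb, hS⟩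
          · exact absurd hcontra h1
          · exact Or.inr hU

lemma getElem_concat_len (X Y : List Char) (c : Char) : (X ++ c :: Y)[X.length]! = c := by
  induction X with
  | nil => simp
  | cons a X ihX => simp [ihX]

lemma take_concat_len (X Y : List Char) (c : Char) :
    (X ++ c :: Y).take (X.length + 1) = X ++ [c] := by
  induction X with
  | nil => simp
  | cons a X ihX => simpa using ihX

lemma bnet_rp : bnet [')'] = -1 := by decide

lemma pre_iff_list (l : List Char) :
    (∀ i < l.length, l[i]! = '(' →
      ∃ j < l.length, i < j ∧ l[j]! = ')' ∧ bnet (l.take (j+1)) = 0) ↔ ¬ Uq 0 l := by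
  constructor
  · intro hP
    rintro ⟨l1, l2, rfl, hS⟩
    have hi : l1.length < (l1 ++ '(' :: l2).length := by simp
    obtain ⟨j, hj, hij, hgj, hnet⟩ := hP l1.length hi (getElem_concat_len l1 l2 '(')
    have hjlen : j < l1.length + 1 + l2.length := by
      have hj' := hj
      simp only [List.length_append, List.length_cons] at hj'
      omega
    set k := j - l1.length - 1 with hk
    have hkl : k < l2.length := by omega
    have hdec2 : l2 = l2.take k ++ l2[k]! :: l2.drop (k+1) := by
      rw [getElem!_pos l2 k hkl]
      conv_lhs => rw [← List.take_append_drop k l2, List.drop_eq_getElem_cons hkl]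
    have hcomb : l1 ++ '(' :: l2 = (l1 ++ '(' :: l2.take k) ++ l2[k]! :: l2.drop (k+1) := by
      conv_lhs => rw [hdec2]
      simp
    have hXlen : (l1 ++ '(' :: l2.take k).length = j := by
      simp only [List.length_append, List.length_cons, List.length_take]
      omega
    have hgk : l2[k]! = ')' := by
      rw [hcomb] at hgj
      rw [← hXlen] at hgj
      rwa [getElem_concat_len] at hgj
    have htake : (l1 ++ '(' :: l2).take (j+1) = (l1 ++ '(' :: l2.take k) ++ [')'] := by
      conv_lhs => rw [hcomb, hgk]
      rw [← hXlen, take_concat_len]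
    rw [htake] at hnet
    have hS' := hS (l2.take k) (l2.drop (k+1)) (by rw [hgk] at hdec2; exact hdec2)
    apply hS'
    rw [bnet_append, bnet_append, bnet_cons, bnet_rp] at hnet
    rw [if_pos rfl] at hnet
    omega
  · intro hU i hi hgi
    by_contra hno
    push_neg at hno
    apply hU
    have hdec : l = l.take i ++ '(' :: l.drop (i+1) := by
      rw [← hgi, getElem!_pos l i hi]
      conv_lhs => rw [← List.take_append_drop i l, List.drop_eq_getElem_cons hi]
    refine ⟨l.take i, l.drop (i+1), hdec, ?_⟩
    intro m1 m2 hm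
    have hcomb : l = (l.take i ++ '(' :: m1) ++ ')' :: m2 := by
      conv_lhs => rw [hdec, hm]
      simp
    have hti : (l.take i).length = i := by
      simp only [List.length_take]
      omega
    have hXlen : (l.take i ++ '(' :: m1).length = i + 1 + m1.length := by
      simp [hti]; omega
    have hlen : l.length = (i + 1 + m1.length) + 1 + m2.length := by
      conv_lhs => rw [hcomb]
      simp; omega
    have hjl : i + 1 + m1.length < l.length := by omega
    have hgj : l[i + 1 + m1.length]! = ')' := by
      conv_lhs => rw [hcomb]
      rw [← hXlen, getElem_concat_len]
    have hnet := hno (i + 1 + m1.length) hjl (by omega) hgj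
    have htake : l.take (i + 1 + m1.length + 1) = (l.take i ++ '(' :: m1) ++ [')'] := by
      conv_lhs => rw [hcomb]
      rw [← hXlen, take_concat_len]
    rw [htake, bnet_append, bnet_append, bnet_cons, bnet_rp] at hnet
    rw [if_pos rfl] at hnet
    intro hcontra; apply hnet; omega

-- ===== VERDICT (by name: the statement is the Claim_ definition above) =====
theorem separateByBracket_spec : Claim_equal_separateByBracket := by
  intro prog _hdom hpre
  unfold Spec_separateByBracket
  unfold separateByBracket separateByBracket_alt
  by_cases hc : ¬ PySem.Chars.isIn ['('] prog.toList ∧ ¬ PySem.Chars.isIn [')'] prog.toList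
  · simp only [if_pos hc]
  · simp only [if_neg hc]
    rw [replace_pad, split_pad]
    have hst : (List.foldl stStep (0, false) prog.toList).2 = false := by
      cases h2 : (List.foldl stStep (0, false) prog.toList).2 with
      | false => rfl
      | true =>
        rcases (st_char prog.toList 0 false).mp h2 with ⟨h, -⟩ | hU
        · simp at h
        · exact absurd hU ((pre_iff_list prog.toList).mp hpre)
    exact (main_lemma prog.toList [] [] 0 false [] []
      ⟨rfl, rfl, by simp⟩ (by simp) hst).symm
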